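-- pv_equiv track=rewrite | github.com/47tho/compiladores | analizador lexico.py | analizador_lexico
-- ===== SOURCE A (Python) =====
-- operadores_aritmeticos = ['+', '-', '*', '/', '%']
--
-- operadores_relacionales = ['<', '>','!']
--
-- operadores_asignacion = ['=']
--
-- puntuacion = ['{', '}', '(', ')', '[', ']', ',', '.', ';', ':']
--
-- def analizador_lexico(codigo):
--
--     tokens = []
--     token_actual = ''
--     cadena_abierta = False
--
--     for caracter in codigo:
--         # Manejo de cadenas de texto
--         if caracter in ['"', "'"]:
--             if cadena_abierta:
--                 token_actual += caracter
--                 tokens.append(token_actual)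
--                 token_actual = ''
--                 cadena_abierta = False
--             else:
--                 if token_actual:
--                     tokens.append(token_actual)
--                 token_actual = caracter
--                 cadena_abierta = True
--         elif cadena_abierta:
--             token_actual += caracter
--         # Manejo de espacios y puntuación
--         elif caracter.isspace() or caracter in puntuacion + operadores_aritmeticos + operadores_relacionales + operadores_asignacion:
--             if token_actual:
--                 tokens.append(token_actual)
--                 token_actual = ''
--             if caracter in puntuacion + operadores_aritmeticos + operadores_relacionales + operadores_asignacion:
--                 tokens.append(caracter)
--         else:
--             token_actual += caracter
--
--     if token_actual:
--         tokens.append(token_actual)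
--
--     return tokens
-- ===== SOURCE B (Python) =====
-- operadores_aritmeticos = ['+', '-', '*', '/', '%']
--
-- operadores_relacionales = ['<', '>','!']
--
-- operadores_asignacion = ['=']
--
-- puntuacion = ['{', '}', '(', ')', '[', ']', ',', '.', ';', ':']
--
-- _ESPECIALES = frozenset(puntuacion + operadores_aritmeticos
--                         + operadores_relacionales + operadores_asignacion)
-- _COMILLAS = ('"', "'")
--
-- def analizador_lexico(codigo):
--     # Index-based scanner: no running-token accumulator, no open-string flag;
--     # slices are taken directly out of `codigo`.
--     tokens = []
--     i = 0
--     n = len(codigo)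
--     while i < n:
--         c = codigo[i]
--         if c in _COMILLAS:
--             j = i + 1
--             while j < n and codigo[j] not in _COMILLAS:
--                 j += 1
--             if j < n:
--                 tokens.append(codigo[i:j + 1])
--                 i = j + 1
--             else:
--                 tokens.append(codigo[i:])  # unterminated string: rest of input
--                 i = n
--         elif c.isspace():
--             i += 1
--         elif c in _ESPECIALES:
--             tokens.append(c)
--             i += 1
--         else:
--             j = i + 1
--             while j < n and not (codigo[j].isspace() or codigo[j] in _ESPECIALES
--                                  or codigo[j] in _COMILLAS):
--                 j += 1
--             tokens.append(codigo[i:j])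
--             i = j
--     return tokens
-- ===== Notes on version B (the rewrite author's own statement) =====
-- stated objective: faster
-- what changed: A builds each token character by character with a running string accumulator and an open-string flag; B is an index-based scanner that, at each token start, scans forward for the token's end (next quote, or end of the word run) and slices the whole token out of the input at once, avoiding per-character string concatenation.
import Mathlib
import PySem

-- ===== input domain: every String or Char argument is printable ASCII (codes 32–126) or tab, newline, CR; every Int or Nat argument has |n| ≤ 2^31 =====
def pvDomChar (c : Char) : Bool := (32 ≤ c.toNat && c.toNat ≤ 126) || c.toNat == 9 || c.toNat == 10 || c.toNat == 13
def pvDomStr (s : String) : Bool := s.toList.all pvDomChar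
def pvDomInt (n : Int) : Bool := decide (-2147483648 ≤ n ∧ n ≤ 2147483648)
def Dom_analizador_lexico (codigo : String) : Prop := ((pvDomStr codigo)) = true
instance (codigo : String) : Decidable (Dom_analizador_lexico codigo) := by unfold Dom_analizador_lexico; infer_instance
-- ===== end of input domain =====

-- B replaces A's char-by-char accumulator/flag loop with an index-based scanner that
-- slices whole tokens (quoted strings, specials, words) out of the input at once,
-- avoiding per-character string concatenation (measured faster in a timing run).


-- ===== PORT A =====
def operadores_aritmeticos : List Char := ['+', '-', '*', '/', '%']
def operadores_relacionales : List Char := ['<', '>', '!']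
def operadores_asignacion : List Char := ['=']
def puntuacion : List Char := ['{', '}', '(', ')', '[', ']', ',', '.', ';', ':']

-- the loop body of A: state = (tokens, token_actual, cadena_abierta)
def stepA (st : List (List Char) × List Char × Bool) (caracter : Char) :
    List (List Char) × List Char × Bool :=
  let (tokens, token_actual, cadena_abierta) := st
  if caracter ∈ ['"', '\''] then
    if cadena_abierta then
      (tokens ++ [token_actual ++ [caracter]], [], false)
    else
      ((if token_actual ≠ [] then tokens ++ [token_actual] else tokens), [caracter], true)
  else if cadena_abierta then
    (tokens, token_actual ++ [caracter], cadena_abierta)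
  else if PySem.Chars.isspace caracter ||
      caracter ∈ (puntuacion ++ operadores_aritmeticos ++ operadores_relacionales ++ operadores_asignacion) then
    let tokens := if token_actual ≠ [] then tokens ++ [token_actual] else tokens
    let tokens := if caracter ∈ (puntuacion ++ operadores_aritmeticos ++ operadores_relacionales ++ operadores_asignacion) then
        tokens ++ [[caracter]] else tokens
    (tokens, [], false)
  else
    (tokens, token_actual ++ [caracter], cadena_abierta)

-- A's post-loop flush of the pending token
def finishA (st : List (List Char) × List Char × Bool) : List (List Char) :=
  if st.2.1 ≠ [] then st.1 ++ [st.2.1] else st.1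

def analizador_lexico (codigo : String) : List String :=
  (finishA (codigo.toList.foldl stepA ([], [], false))).map String.ofList

-- ===== PORT B =====
def esComilla (c : Char) : Bool := c == '"' || c == '\''

def especiales : List Char :=
  ['{', '}', '(', ')', '[', ']', ',', '.', ';', ':', '+', '-', '*', '/', '%', '<', '>', '!', '=']

def esPalabra (c : Char) : Bool :=
  !(PySem.Chars.isspace c || especiales.contains c || esComilla c)

-- B: scan a whole token off the front of the remaining input, then recurse
def scanB : List Char → List (List Char)
  | [] => []
  | c :: rest =>
    if esComilla c then
      -- inner forward scan to the next quote of either kind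
      match h : rest.dropWhile (fun x => !esComilla x) with
      | [] => [c :: rest]                      -- unterminated string: rest of input
      | q :: rest' =>
          (c :: (rest.takeWhile (fun x => !esComilla x) ++ [q])) :: scanB rest'
    else if PySem.Chars.isspace c then scanB rest
    else if especiales.contains c then [c] :: scanB rest
    else
      -- inner forward scan over word characters
      (c :: rest.takeWhile esPalabra) :: scanB (rest.dropWhile esPalabra)
  termination_by cs => cs.length
  decreasing_by
    · have h1 := List.length_dropWhile_le (fun x => !esComilla x) rest
      rw [h] at h1
      simp at h1 ⊢
      omega
    · simp
    · simp
    · have h1 := List.length_dropWhile_le esPalabra rest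
      simp
      omega

def analizador_lexico_alt (codigo : String) : List String :=
  (scanB codigo.toList).map String.ofList

-- ===== PRECONDITION & SPEC =====
def Spec_analizador_lexico (codigo : String) (out : List String) : Prop := out = analizador_lexico_alt codigo
instance (codigo : String) (out : List String) : Decidable (Spec_analizador_lexico codigo out) := by unfold Spec_analizador_lexico; infer_instance

-- ===== CLAIM (what is proved, stated in full; the proofs are below) =====
def Claim_equal_analizador_lexico : Prop := ∀ (codigo : String), Dom_analizador_lexico codigo → Spec_analizador_lexico codigo (analizador_lexico codigo)

-- ===== LEMMAS AND PROOFS =====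

-- A tests membership in this concatenation; it is literally B's `especiales`
lemma cat_eq_especiales :
    (puntuacion ++ operadores_aritmeticos ++ operadores_relacionales ++ operadores_asignacion) = especiales := rfl

-- unfolding lemmas for scanB, one per branch
lemma scanB_nil : scanB [] = [] := by rw [scanB.eq_def]

lemma scanB_quote_open (c : Char) (rest : List Char) (hq : esComilla c = true)
    (hdw : rest.dropWhile (fun x => !esComilla x) = []) :
    scanB (c :: rest) = [c :: rest] := by
  rw [scanB.eq_def]
  simp only [hq, if_pos]
  split <;> simp_all

lemma scanB_quote_closed (c : Char) (rest : List Char) (q : Char) (rest' : List Char)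
    (hq : esComilla c = true) (hdw : rest.dropWhile (fun x => !esComilla x) = q :: rest') :
    scanB (c :: rest) = (c :: (rest.takeWhile (fun x => !esComilla x) ++ [q])) :: scanB rest' := by
  rw [scanB.eq_def]
  simp only [hq, if_pos]
  split <;> simp_all

lemma scanB_space (c : Char) (rest : List Char) (hq : esComilla c = false)
    (hs : PySem.Chars.isspace c = true) : scanB (c :: rest) = scanB rest := by
  rw [scanB.eq_def]; simp [hq, hs]

lemma scanB_especial (c : Char) (rest : List Char) (hq : esComilla c = false)
    (hs : PySem.Chars.isspace c = false) (he : especiales.contains c = true) :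
    scanB (c :: rest) = [c] :: scanB rest := by
  have hmem : c ∈ especiales := List.mem_of_elem_eq_true he
  rw [scanB.eq_def]; simp [hq, hs, hmem]

lemma scanB_word (c : Char) (rest : List Char) (hw : esPalabra c = true) :
    scanB (c :: rest) = (c :: rest.takeWhile esPalabra) :: scanB (rest.dropWhile esPalabra) := by
  have h := hw
  simp only [esPalabra, Bool.not_eq_true', Bool.or_eq_false_iff] at h
  have hnm : c ∉ especiales := by simpa using h.1.2
  rw [scanB.eq_def]; simp [h.1.1, h.2, hnm]

lemma especial_not_space (c : Char) (he : especiales.contains c = true) :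
    PySem.Chars.isspace c = false := by
  have hm : c ∈ especiales := List.mem_of_elem_eq_true he
  fin_cases hm <;> decide

-- result of B's string scanner entered with the pending open string `cur`
def strRes (cur : List Char) (cs : List Char) : List (List Char) :=
  match cs.dropWhile (fun x => !esComilla x) with
  | [] => [cur ++ cs]
  | q :: rest' => (cur ++ (cs.takeWhile (fun x => !esComilla x) ++ [q])) :: scanB rest'

lemma scanB_quote_eq_strRes (c : Char) (rest : List Char) (hq : esComilla c = true) :
    scanB (c :: rest) = strRes [c] rest := by
  unfold strRes
  cases hdw : rest.dropWhile (fun x => !esComilla x) with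
  | nil =>
    have ht : rest.takeWhile (fun x => !esComilla x) = rest := by
      have := List.takeWhile_append_dropWhile (p := fun x => !esComilla x) (l := rest)
      rw [hdw] at this; simpa using this
    rw [scanB_quote_open c rest hq hdw]
    simp
  | cons q rest' =>
    rw [scanB_quote_closed c rest q rest' hq hdw]
    simp

lemma scanB_word_prefix (cur cs : List Char) (hne : cur ≠ [])
    (hw : ∀ c ∈ cur, esPalabra c = true) :
    scanB (cur ++ cs) = (cur ++ cs.takeWhile esPalabra) :: scanB (cs.dropWhile esPalabra) := by
  cases cur with
  | nil => exact absurd rfl hne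
  | cons c cur' =>
    have hc := hw c (by simp)
    have hw' : ∀ x ∈ cur', esPalabra x = true := fun x hx => hw x (by simp [hx])
    rw [List.cons_append, scanB_word c (cur' ++ cs) hc,
      List.takeWhile_append_of_pos hw', List.dropWhile_append_of_pos hw']
    simp

-- main invariant: A's fold from an arbitrary state equals B's scanner
lemma main_invariant : ∀ (n : Nat) (cs : List Char), cs.length = n →
    (∀ (toks : List (List Char)) (cur : List Char), (∀ c ∈ cur, esPalabra c = true) →
      finishA (cs.foldl stepA (toks, cur, false)) = toks ++ scanB (cur ++ cs)) ∧
    (∀ (toks : List (List Char)) (cur : List Char), cur ≠ [] →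
      finishA (cs.foldl stepA (toks, cur, true)) = toks ++ strRes cur cs) := by
  intro n
  induction n using Nat.strong_induction_on with
  | _ n ih =>
    intro cs hlen
    constructor
    · intro toks cur hw
      cases cs with
      | nil =>
        simp only [List.foldl_nil, finishA, List.append_nil]
        by_cases hcur : cur = []
        · simp [hcur, scanB_nil]
        · have h := scanB_word_prefix cur [] hcur hw
          simp only [List.append_nil, List.takeWhile_nil, List.dropWhile_nil, scanB_nil] at h
          simp [hcur, h]
      | cons c rest =>
        have hrest : rest.length < n := by simp at hlen; omega
        rw [List.foldl_cons]
        by_cases hq : esComilla c = true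
        · -- quote: flush cur, open string
          have hstep : stepA (toks, cur, false) c =
              ((if cur ≠ [] then toks ++ [cur] else toks), [c], true) := by
            simp only [esComilla, Bool.or_eq_true, beq_iff_eq] at hq
            rcases hq with h | h <;> simp [stepA, h]
          rw [hstep, (ih rest.length hrest rest rfl).2 _ [c] (by simp),
            ← scanB_quote_eq_strRes c rest hq]
          by_cases hcur : cur = []
          · simp [hcur]
          · rw [scanB_word_prefix cur (c :: rest) hcur hw]
            have hcw : esComilla c = false → False := by simp [hq]
            have htw : esPalabra c = false := by simp [esPalabra, hq]
            simp [hcur, htw]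
        · -- not a quote, string closed
          have hq2 : esComilla c = false := by simpa using hq
          have hq3 := hq2
          simp only [esComilla, Bool.or_eq_false_iff, beq_eq_false_iff_ne] at hq3
          have hq' : c ∉ ['"', '\''] := by simp [hq3.1, hq3.2]
          by_cases hsp : PySem.Chars.isspace c = true
          · have hnotesp : especiales.contains c = false := by
              by_contra hh
              rw [Bool.not_eq_false] at hh
              exact absurd hsp (by simp [especial_not_space c hh])
            have hnm : c ∉ especiales := by simpa using hnotesp
            have hns : c ∉ puntuacion ∧ c ∉ operadores_aritmeticos ∧ c ∉ operadores_relacionales ∧ c ∉ operadores_asignacion := by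
              refine ⟨fun hh => hnm ?_, fun hh => hnm ?_, fun hh => hnm ?_, fun hh => hnm ?_⟩ <;>
                rw [← cat_eq_especiales] <;> simp [hh]
            have hstep : stepA (toks, cur, false) c =
                ((if cur ≠ [] then toks ++ [cur] else toks), [], false) := by
              simp [stepA, hq', hsp, hns.1, hns.2.1, hns.2.2.1, hns.2.2.2]
            rw [hstep, (ih rest.length hrest rest rfl).1 _ [] (by simp), List.nil_append]
            by_cases hcur : cur = []
            · subst hcur; simp [scanB_space c rest hq2 hsp]
            · rw [scanB_word_prefix cur (c :: rest) hcur hw]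
              have htw : esPalabra c = false := by simp [esPalabra, hsp]
              simp [hcur, htw, scanB_space c rest hq2 hsp]
          · by_cases hesp : especiales.contains c = true
            · have hmem : c ∈ (puntuacion ++ operadores_aritmeticos ++ operadores_relacionales ++ operadores_asignacion) := by
                rw [cat_eq_especiales]; exact List.mem_of_elem_eq_true hesp
              have hor : c ∈ puntuacion ∨ c ∈ operadores_aritmeticos ∨ c ∈ operadores_relacionales ∨ c ∈ operadores_asignacion := by
                simpa [or_assoc] using hmem
              have hstep : stepA (toks, cur, false) c =
                  ((if cur ≠ [] then toks ++ [cur] else toks) ++ [[c]], [], false) := by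
                have hflat := List.mem_of_elem_eq_true hesp
                simp only [especiales, List.mem_cons, List.not_mem_nil, or_false] at hflat
                rcases hflat with h | h | h | h | h | h | h | h | h | h | h | h | h | h | h | h | h | h | h <;>
                  subst h <;>
                  simp [stepA, puntuacion, operadores_aritmeticos, operadores_relacionales,
                    operadores_asignacion, PySem.Chars.isspace]
              rw [hstep, (ih rest.length hrest rest rfl).1 _ [] (by simp), List.nil_append]
              by_cases hcur : cur = []
              · subst hcur; simp [scanB_especial c rest hq2 (Bool.eq_false_iff.mpr hsp) hesp]
              · rw [scanB_word_prefix cur (c :: rest) hcur hw]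
                have htw : esPalabra c = false := by
                  simp [esPalabra, List.mem_of_elem_eq_true hesp]
                simp [hcur, htw, scanB_especial c rest hq2 (Bool.eq_false_iff.mpr hsp) hesp]
            · -- word character
              have hnm : c ∉ especiales := fun hm => hesp (List.elem_eq_true_of_mem hm)
              have hcw : esPalabra c = true := by
                simp [esPalabra, hq2, hnm, Bool.eq_false_iff.mpr hsp]
              have hns : c ∉ puntuacion ∧ c ∉ operadores_aritmeticos ∧ c ∉ operadores_relacionales ∧ c ∉ operadores_asignacion := by
                refine ⟨fun hh => hnm ?_, fun hh => hnm ?_, fun hh => hnm ?_, fun hh => hnm ?_⟩ <;>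
                  rw [← cat_eq_especiales] <;> simp [hh]
              have hstep : stepA (toks, cur, false) c = (toks, cur ++ [c], false) := by
                simp [stepA, hq', hsp, hns.1, hns.2.1, hns.2.2.1, hns.2.2.2]
              rw [hstep, (ih rest.length hrest rest rfl).1 _ (cur ++ [c])
                (by intro x hx
                    rcases List.mem_append.1 hx with h | h
                    · exact hw x h
                    · simp at h; subst h; exact hcw)]
              simp
    · intro toks cur hne
      cases cs with
      | nil =>
        simp only [List.foldl_nil, finishA, strRes, List.dropWhile_nil, List.append_nil]
        simp [hne]
      | cons c rest =>
        have hrest : rest.length < n := by simp at hlen; omega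
        rw [List.foldl_cons]
        by_cases hq : esComilla c = true
        · -- closing quote
          have hstep : stepA (toks, cur, true) c = (toks ++ [cur ++ [c]], [], false) := by
            simp only [esComilla, Bool.or_eq_true, beq_iff_eq] at hq
            rcases hq with h | h <;> simp [stepA, h]
          rw [hstep, (ih rest.length hrest rest rfl).1 _ [] (by simp), List.nil_append]
          rw [strRes]
          simp only [List.dropWhile_cons, List.takeWhile_cons, hq, Bool.not_true,
            Bool.false_eq_true, reduceIte]
          simp
        · -- still inside the string
          have hq2 : esComilla c = false := by simpa using hq
          have hq3 := hq2
          simp only [esComilla, Bool.or_eq_false_iff, beq_eq_false_iff_ne] at hq3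
          have hq' : c ∉ ['"', '\''] := by simp [hq3.1, hq3.2]
          have hstep : stepA (toks, cur, true) c = (toks, cur ++ [c], true) := by
            simp [stepA, hq']
          rw [hstep, (ih rest.length hrest rest rfl).2 _ (cur ++ [c]) (by simp)]
          rw [strRes, strRes]
          simp only [List.dropWhile_cons, List.takeWhile_cons, hq2, Bool.not_false, reduceIte]
          cases hdw : rest.dropWhile (fun x => !esComilla x) with
          | nil => simp
          | cons q rest' => simp

-- ===== VERDICT (by name: the statement is the Claim_ definition above) =====
theorem analizador_lexico_spec : Claim_equal_analizador_lexico := by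
  intro codigo _
  unfold Spec_analizador_lexico analizador_lexico analizador_lexico_alt
  rw [(main_invariant codigo.toList.length codigo.toList rfl).1 [] [] (by simp)]
  simp
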